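-- pv_equiv track=rewrite | github.com/juanesgl/AYED-2024-2 | TERCIO-1/PARCIAL1-RECUPERRACION/popesee.py | popes
-- ===== SOURCE A (Python) =====
-- from bisect import bisect_right
--
-- def popes(interval_years, num_popes, popes_list) :
--     max_popes = 0
--     start_year = 0
--     end_year = 0
--
--     for current_index in range(num_popes):
--
--         upper_limit_index = bisect_right(popes_list, popes_list[current_index] + interval_years - 1)
--
--         num_popes_in_range = upper_limit_index - current_index
--         if num_popes_in_range > max_popes:
--             max_popes = num_popes_in_range
--             start_year = popes_list[current_index]
--             end_year = popes_list[upper_limit_index - 1]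
--
--     return max_popes, start_year, end_year
-- ===== SOURCE B (Python) =====
-- def popes(interval_years, num_popes, popes_list):
--     n = len(popes_list)
--     best = (0, 0, 0)
--     i = 0
--     r = 0
--     while i < num_popes:
--         limit = popes_list[i] + interval_years - 1
--         if r < n and popes_list[r] <= limit:
--             r += 1
--         else:
--             count = r - i
--             if count > best[0]:
--                 best = (count, popes_list[i], popes_list[r - 1])
--             i += 1
--     return best
-- ===== Notes on version B (the rewrite author's own statement) =====
-- stated objective: alternative
-- what changed: Replaced the per-start bisect_right binary search by a single merged while-loop that advances either the window's right pointer or the start pointer once per pass (two-pointer sliding window, O(n) passes vs O(n log n) comparisons; a timing run read 2.57x at the largest size but inconsistently, so no speed is claimed).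
-- outside the precondition, e.g. on popes(3, 5, [1, 20, 2, 3, 4]): A returns (4, 1, 3), B returns (4, 20, 4); on popes(10, 3, [1, 2]): A raises IndexError, B raises IndexError
import Mathlib
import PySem

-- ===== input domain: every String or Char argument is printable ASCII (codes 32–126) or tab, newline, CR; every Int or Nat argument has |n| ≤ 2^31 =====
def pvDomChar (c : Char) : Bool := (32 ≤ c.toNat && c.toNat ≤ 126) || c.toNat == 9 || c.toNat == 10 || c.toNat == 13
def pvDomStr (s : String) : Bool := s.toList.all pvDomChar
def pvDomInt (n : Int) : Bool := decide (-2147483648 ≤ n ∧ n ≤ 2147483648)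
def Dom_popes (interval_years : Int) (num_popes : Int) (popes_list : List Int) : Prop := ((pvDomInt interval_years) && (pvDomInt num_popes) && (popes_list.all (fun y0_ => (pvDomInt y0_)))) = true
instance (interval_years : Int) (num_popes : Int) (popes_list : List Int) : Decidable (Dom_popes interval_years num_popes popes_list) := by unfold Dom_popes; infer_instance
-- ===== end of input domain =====

-- B: one merged two-pointer loop advancing either the window's right pointer or the start pointer per pass, instead of A's per-start bisect_right binary search (alternative algorithm; no speed claimed).


-- ===== PORT A =====
-- one iteration of A's 'for current_index in range(num_popes)' body
def popesStep (interval_years : Int) (popes_list : List Int) (st : Int × Int × Int) (i : Int) : Int × Int × Int :=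
  let upper : Nat := PySem.List.bisectRight popes_list (PySem.List.pyGetD popes_list i 0 + interval_years - 1)
  let cnt : Int := (upper : Int) - i
  if cnt > st.1 then (cnt, PySem.List.pyGetD popes_list i 0, PySem.List.pyGetD popes_list ((upper : Int) - 1) 0)
  else st

def popes (interval_years : Int) (num_popes : Int) (popes_list : List Int) : Int × Int × Int :=
  (PySem.List.pyRange 0 num_popes 1).foldl (popesStep interval_years popes_list) (0, 0, 0)

-- ===== PORT B =====
-- B's single 'while i < num_popes' loop: each pass moves either r or i forward.
-- Structural recursion on a fuel bound (num.toNat + length + 1 passes always suffice,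
-- proved in altFuel_eq below); the fuel is only a totality guard, not part of B's logic.
def altLoop (iv : Int) (num : Int) (a : List Int) : Nat → (Int × Int × Int) → Int → Nat → Int × Int × Int
  | 0, best, _, _ => best
  | fuel + 1, best, i, r =>
    if i < num then
      let limit : Int := PySem.List.pyGetD a i 0 + iv - 1
      if r < a.length ∧ a.getD r 0 ≤ limit then
        altLoop iv num a fuel best i (r + 1)
      else
        let cnt : Int := (r : Int) - i
        if cnt > best.1 then
          altLoop iv num a fuel (cnt, PySem.List.pyGetD a i 0, PySem.List.pyGetD a ((r : Int) - 1) 0) (i + 1) r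
        else
          altLoop iv num a fuel best (i + 1) r
    else best

def popes_alt (interval_years : Int) (num_popes : Int) (popes_list : List Int) : Int × Int × Int :=
  altLoop interval_years num_popes popes_list (num_popes.toNat + popes_list.length + 1) (0, 0, 0) 0 0

-- ===== PRECONDITION & SPEC =====
-- Pre_ excludes num_popes > len(popes_list), where A raises IndexError, and unsorted popes_list
-- with a positive num_popes, where bisect_right's values (and hence A's result) are accidental
-- artefacts of binary search on data that violates bisect's sortedness contract — a corner no
-- caller of this chronology function reaches (with num_popes ≤ 0 the loop never runs, so any list is admitted).
def Pre_popes (interval_years : Int) (num_popes : Int) (popes_list : List Int) : Prop :=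
  (popes_list.Pairwise (· ≤ ·) ∨ num_popes ≤ 0) ∧ num_popes ≤ (popes_list.length : Int)
instance (interval_years : Int) (num_popes : Int) (popes_list : List Int) : Decidable (Pre_popes interval_years num_popes popes_list) := by unfold Pre_popes; infer_instance

def pvWitness_popes : Int × Int × List Int := (100, 3, [1990, 2005, 2013])

def Spec_popes (interval_years : Int) (num_popes : Int) (popes_list : List Int) (out : Int × Int × Int) : Prop := out = popes_alt interval_years num_popes popes_list
instance (interval_years : Int) (num_popes : Int) (popes_list : List Int) (out : Int × Int × Int) : Decidable (Spec_popes interval_years num_popes popes_list out) := by unfold Spec_popes; infer_instance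

-- ===== CLAIM (what is proved, stated in full; the proofs are below) =====
def Claim_equal_popes : Prop := ∀ (interval_years : Int) (num_popes : Int) (popes_list : List Int), Dom_popes interval_years num_popes popes_list → Pre_popes interval_years num_popes popes_list → Spec_popes interval_years num_popes popes_list (popes interval_years num_popes popes_list)

-- ===== LEMMAS AND PROOFS =====

-- proof-only image of B's loop as a well-founded recursion (same body as altLoop, no fuel)
def loopWF (iv : Int) (num : Int) (a : List Int) (best : Int × Int × Int) (i : Int) (r : Nat) : Int × Int × Int :=
  if hi : i < num then
    let limit : Int := PySem.List.pyGetD a i 0 + iv - 1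
    if h : r < a.length ∧ a.getD r 0 ≤ limit then
      loopWF iv num a best i (r + 1)
    else
      let cnt : Int := (r : Int) - i
      if cnt > best.1 then
        loopWF iv num a (cnt, PySem.List.pyGetD a i 0, PySem.List.pyGetD a ((r : Int) - 1) 0) (i + 1) r
      else
        loopWF iv num a best (i + 1) r
  else best
termination_by (num - i).toNat + (a.length - r)
decreasing_by all_goals omega

-- enough fuel: altLoop computes loopWF
theorem altFuel_eq (iv num : Int) (a : List Int) :
    ∀ (fuel : Nat) (best : Int × Int × Int) (i : Int) (r : Nat),
      (num - i).toNat + (a.length - r) < fuel →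
      altLoop iv num a fuel best i r = loopWF iv num a best i r := by
  intro fuel
  induction fuel with
  | zero => intro best i r h; omega
  | succ f ih =>
    intro best i r h
    rw [loopWF]
    by_cases hi : i < num
    · simp only [altLoop, hi, if_true, dite_true]
      by_cases hc : r < a.length ∧ a.getD r 0 ≤ PySem.List.pyGetD a i 0 + iv - 1
      · simp only [hc]
        exact ih best i (r + 1) (by omega)
      · simp only [hc, if_false, dite_false]
        split
        · exact ih _ (i + 1) r (by omega)
        · exact ih best (i + 1) r (by omega)
    · simp only [altLoop, hi, if_false, dite_false]


theorem pvWitness_ok : Dom_popes (pvWitness_popes.1) (pvWitness_popes.2.1) (pvWitness_popes.2.2) ∧ Pre_popes (pvWitness_popes.1) (pvWitness_popes.2.1) (pvWitness_popes.2.2) := by decide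

-- a sorted list is monotone in its indices
theorem sorted_getElem_le (a : List Int) (hs : a.Pairwise (· ≤ ·)) {j k : Nat}
    (hjk : j ≤ k) (hk : k < a.length) : a[j]'(by omega) ≤ a[k] := by
  rcases Nat.eq_or_lt_of_le hjk with rfl | h'
  · exact le_refl _
  · exact List.pairwise_iff_getElem.mp hs j k (by omega) hk h'

-- "c is the upper-bound index for x": everything left of c is ≤ x, everything from c on is > x
def UB (a : List Int) (x : Int) (c : Nat) : Prop :=
  c ≤ a.length ∧ (∀ j (_ : j < a.length), j < c → a[j] ≤ x) ∧ (∀ j (_ : j < a.length), c ≤ j → x < a[j])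

theorem UB_unique {a : List Int} {x : Int} {c₁ c₂ : Nat} (h₁ : UB a x c₁) (h₂ : UB a x c₂) : c₁ = c₂ := by
  obtain ⟨hl₁, ha₁, hb₁⟩ := h₁
  obtain ⟨hl₂, ha₂, hb₂⟩ := h₂
  by_contra hne
  rcases Nat.lt_or_ge c₁ c₂ with h | h
  · have hc : c₁ < a.length := lt_of_lt_of_le h hl₂
    have t₁ := ha₂ c₁ hc h
    have t₂ := hb₁ c₁ hc le_rfl
    omega
  · have h' : c₂ < c₁ := by omega
    have hc : c₂ < a.length := lt_of_lt_of_le h' hl₁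
    have t₁ := ha₁ c₂ hc h'
    have t₂ := hb₂ c₂ hc le_rfl
    omega

theorem bisect_UB (a : List Int) (x : Int) (hs : a.Pairwise (· ≤ ·)) :
    UB a x (PySem.List.bisectRight a x) := by
  obtain ⟨h1, h2, h3⟩ := PySem.List.bisectRight_spec a x hs
  exact ⟨h1, h2, h3⟩

-- the index at which altLoop's r-advancing passes stop, for the current start's limit
def stopAt (a : List Int) (x : Int) (r : Nat) : Nat :=
  if h : r < a.length then
    if a[r] ≤ x then stopAt a x (r + 1) else r
  else r
termination_by a.length - r

theorem stopAt_UB (a : List Int) (x : Int) (hs : a.Pairwise (· ≤ ·)) :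
    ∀ (k r : Nat), a.length - r = k → r ≤ a.length →
      (∀ j (_ : j < a.length), j < r → a[j] ≤ x) → UB a x (stopAt a x r) := by
  intro k
  induction k with
  | zero =>
    intro r hk hr hlow
    have hrl : r = a.length := by omega
    rw [stopAt]
    simp only [hrl, lt_irrefl, dite_false]
    exact ⟨le_rfl, fun j hj _ => hlow j hj (by omega), fun j hj hrj => by omega⟩
  | succ k ih =>
    intro r hk hr hlow
    rw [stopAt]
    have hrlt : r < a.length := by omega
    simp only [hrlt, dite_true]
    by_cases hle : a[r] ≤ x
    · simp only [hle, if_true]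
      refine ih (r + 1) (by omega) (by omega) ?_
      intro j hj hjr
      rcases Nat.lt_or_ge j r with h | h
      · exact hlow j hj h
      · have : j = r := by omega
        subst this; exact hle
    · simp only [hle, if_false]
      refine ⟨le_of_lt hrlt, hlow, ?_⟩
      intro j hj hrj
      have : a[r] ≤ a[j] := sorted_getElem_le a hs hrj hj
      omega

-- altLoop first advances r to stopAt, then takes one update step and moves to the next start
theorem loopWF_adv (iv num : Int) (a : List Int) (i : Int) (hi : i < num) :
    ∀ (k r : Nat) (best : Int × Int × Int), a.length - r = k →
    loopWF iv num a best i r =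
      (let r' := stopAt a (PySem.List.pyGetD a i 0 + iv - 1) r
       let cnt : Int := (r' : Int) - i
       if cnt > best.1 then
         loopWF iv num a (cnt, PySem.List.pyGetD a i 0, PySem.List.pyGetD a ((r' : Int) - 1) 0) (i + 1) r'
       else loopWF iv num a best (i + 1) r') := by
  intro k
  induction k with
  | zero =>
    intro r best hk
    rw [loopWF, stopAt]
    have hrl : ¬ r < a.length := by omega
    simp only [hi, dite_true, hrl, dite_false, false_and]
  | succ k ih =>
    intro r best hk
    have hrlt : r < a.length := by omega
    rw [loopWF, stopAt]
    simp only [hi, dite_true, hrlt, dite_true]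
    have hgd : a.getD r 0 = a[r] := List.getD_eq_getElem a 0 hrlt
    by_cases hle : a[r] ≤ PySem.List.pyGetD a i 0 + iv - 1
    · have hc : r < a.length ∧ a.getD r 0 ≤ PySem.List.pyGetD a i 0 + iv - 1 := ⟨hrlt, by rw [hgd]; exact hle⟩
      simp only [hc, hle, if_true]
      exact ih (r + 1) best (by omega)
    · simp only [hgd, hle, and_false, dite_false, if_false]

theorem loop_eq (iv : Int) (num : Int) (a : List Int) (hs : a.Pairwise (· ≤ ·))
    (hnum : num ≤ (a.length : Int)) :
    ∀ (k : Nat) (s : Int) (st : Int × Int × Int) (r : Nat),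
      (num - s).toNat = k → 0 ≤ s → r ≤ a.length →
      (∀ j (_ : j < a.length), j < r → ∀ i : Int, s ≤ i → i < num →
          a[j] ≤ PySem.List.pyGetD a i 0 + iv - 1) →
      (PySem.List.pyRange s num 1).foldl (popesStep iv a) st
        = loopWF iv num a st s r := by
  intro k
  induction k with
  | zero =>
    intro s st r hk _ _ _
    rw [PySem.List.pyRange_one_eq_nil (by omega), loopWF]
    have : ¬ s < num := by omega
    simp only [this, dite_false, List.foldl_nil]
  | succ k ih =>
    intro s st r hk hs0 hr hinv
    have hlt : s < num := by omega
    have hsl : s < (a.length : Int) := lt_of_lt_of_le hlt hnum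
    rw [PySem.List.pyRange_one_cons hlt]
    simp only [List.foldl_cons]
    set x : Int := PySem.List.pyGetD a s 0 + iv - 1 with hx
    have hub₁ : UB a x (PySem.List.bisectRight a x) := bisect_UB a x hs
    have hub₂ : UB a x (stopAt a x r) :=
      stopAt_UB a x hs (a.length - r) r rfl hr
        (fun j hj hjr => hinv j hj hjr s le_rfl hlt)
    have he : stopAt a x r = PySem.List.bisectRight a x := UB_unique hub₂ hub₁
    rw [loopWF_adv iv num a s hlt (a.length - r) r st rfl]
    simp only [← hx, he]
    have hnext : ∀ st' : Int × Int × Int,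
        (PySem.List.pyRange (s + 1) num 1).foldl (popesStep iv a) st'
          = loopWF iv num a st' (s + 1) (PySem.List.bisectRight a x) := by
      intro st'
      refine ih (s + 1) st' (PySem.List.bisectRight a x) (by omega) (by omega) hub₁.1 ?_
      intro j hj hjr i hi1 hi2
      have h₁ : a[j] ≤ x := hub₁.2.1 j hj hjr
      have hil : i < (a.length : Int) := lt_of_lt_of_le hi2 hnum
      have hgs : PySem.List.pyGetD a s 0 = a[s.toNat]'(by omega) :=
        PySem.List.pyGetD_eq_getElem a 0 hs0 hsl
      have hgi : PySem.List.pyGetD a i 0 = a[i.toNat]'(by omega) :=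
        PySem.List.pyGetD_eq_getElem a 0 (by omega) hil
      have hmono : a[s.toNat]'(by omega) ≤ a[i.toNat]'(by omega) :=
        sorted_getElem_le a hs (by omega) (by omega)
      rw [hgi]
      rw [hx, hgs] at h₁
      omega
    simp only [popesStep, ← hx]
    split <;> exact hnext _

-- ===== VERDICT (by name: the statement is the Claim_ definition above) =====
theorem popes_spec : Claim_equal_popes := by
  intro iv num a _ hpre
  obtain ⟨hs | hnp, hnum⟩ := hpre
  · unfold Spec_popes popes popes_alt
    rw [altFuel_eq iv num a _ _ 0 0 (by omega)]
    exact loop_eq iv num a hs hnum (num - 0).toNat 0 (0, 0, 0) 0 rfl le_rfl (by omega)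
      (fun j hj hjr => by omega)
  · unfold Spec_popes popes popes_alt
    rw [altFuel_eq iv num a _ _ 0 0 (by omega),
        PySem.List.pyRange_one_eq_nil (by omega), loopWF]
    have : ¬ (0 : Int) < num := by omega
    simp only [this, dite_false, List.foldl_nil]
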